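-- pv_equiv track=rewrite | github.com/gurkantngl/KOU_ProLab2.1 | main.py | suggestPos
-- ===== SOURCE A (Python) =====
-- def suggestPos(cells):
--
--     cellArr = []
--
--     for i in range (len(cells)):
--             if cells[i]:
--                 cellArr.append(cells[i][0])
--
--             else:
--                 cellArr.append(3)
--     return cells[cellArr.index(min(cellArr))]
-- ===== SOURCE B (Python) =====
-- def suggestPos(cells):
--     # Single pass: track the best cell and its key (cell[0], or 3 for an empty cell).
--     # Strict '<' keeps the first minimizing cell, matching index(min(...)).
--     best = None
--     for cell in cells:
--         key = cell[0] if cell else 3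
--         if best is None or key < best[0]:
--             best = (key, cell)
--     if best is None:
--         raise ValueError("suggestPos: empty cells")
--     return best[1]
-- ===== Notes on version B (the rewrite author's own statement) =====
-- stated objective: simpler
-- what changed: Replaces the three-pass scheme (build a parallel key list, min() over it, .index() scan, then subscript) by one fused pass that tracks the best (key, cell) pair with strict '<' for first-occurrence tie-breaking.
import Mathlib
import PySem

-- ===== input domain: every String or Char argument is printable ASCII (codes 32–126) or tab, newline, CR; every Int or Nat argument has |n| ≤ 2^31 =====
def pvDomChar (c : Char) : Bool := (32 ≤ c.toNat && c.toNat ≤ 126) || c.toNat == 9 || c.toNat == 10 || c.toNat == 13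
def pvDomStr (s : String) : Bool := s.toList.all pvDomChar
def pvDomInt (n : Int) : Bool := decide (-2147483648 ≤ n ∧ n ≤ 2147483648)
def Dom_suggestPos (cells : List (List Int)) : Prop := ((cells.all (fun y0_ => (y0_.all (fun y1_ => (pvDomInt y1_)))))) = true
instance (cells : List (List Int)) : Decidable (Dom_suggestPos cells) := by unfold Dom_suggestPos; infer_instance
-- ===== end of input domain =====

-- B fuses A's three passes (key list, min(), .index(), subscript) into one best-(key,cell) pass; same result on nonempty input.


-- ===== PORT A =====
def suggestPos (cells : List (List Int)) : List Int :=
  let cellArr := (PySem.List.pyRange 0 (cells.length : Int) 1).foldl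
    (fun acc i =>
      if PySem.List.pyGetD cells i [] ≠ [] then
        acc ++ [PySem.List.pyGetD (PySem.List.pyGetD cells i []) 0 0]
      else acc ++ [3]) []
  match PySem.List.min? cellArr (fun x => x) with
  | none => []  -- min([]) raises ValueError: excluded by Pre_suggestPos
  | some m =>
    match PySem.List.index? cellArr m with
    | some j => PySem.List.pyGetD cells (j : Int) []
    | none => []  -- unreachable: min is a member

-- ===== PORT B =====
def suggestPos_alt (cells : List (List Int)) : List Int :=
  let best := cells.foldl
    (fun best cell =>
      let key : Int := match cell with | [] => 3 | v :: _ => v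
      match best with
      | none => some (key, cell)
      | some b => if key < b.1 then some (key, cell) else some b)
    none
  match best with
  | some b => b.2
  | none => []  -- Source B raises ValueError here: excluded by Pre_suggestPos

-- ===== PRECONDITION & SPEC =====
-- Pre_ excludes only the empty list, on which both Pythons raise ValueError.
def Pre_suggestPos (cells : List (List Int)) : Prop := cells ≠ []
instance (cells : List (List Int)) : Decidable (Pre_suggestPos cells) := by unfold Pre_suggestPos; infer_instance
def pvWitness_suggestPos : List (List Int) := [[2, 1], [], [0, 5]]
def Spec_suggestPos (cells : List (List Int)) (out : List Int) : Prop := out = suggestPos_alt cells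
instance (cells : List (List Int)) (out : List Int) : Decidable (Spec_suggestPos cells out) := by unfold Spec_suggestPos; infer_instance

-- ===== CLAIM (what is proved, stated in full; the proofs are below) =====
def Claim_equal_suggestPos : Prop := ∀ (cells : List (List Int)), Dom_suggestPos cells → Pre_suggestPos cells → Spec_suggestPos cells (suggestPos cells)

-- ===== LEMMAS AND PROOFS =====

-- key of a cell, as both programs compute it
def keyOf (c : List Int) : Int := match c with | [] => 3 | v :: _ => v

-- B's accumulator step
def stepB (best : Option (Int × List Int)) (cell : List Int) : Option (Int × List Int) :=
  let key : Int := keyOf cell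
  match best with
  | none => some (key, cell)
  | some b => if key < b.1 then some (key, cell) else some b

-- running best of B once the accumulator is set
def pick (bk : Int) (bc : List Int) : List (List Int) → Int × List Int
  | [] => (bk, bc)
  | c :: t => if keyOf c < bk then pick (keyOf c) c t else pick bk bc t

lemma foldB_some (t : List (List Int)) : ∀ (bk : Int) (bc : List Int),
    t.foldl stepB (some (bk, bc)) = some (pick bk bc t) := by
  induction t with
  | nil => intro bk bc; simp [pick]
  | cons c t ih =>
    intro bk bc
    simp only [List.foldl_cons, stepB, pick]
    by_cases h : keyOf c < bk
    · simp [h, ih]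
    · simp [h, ih]

lemma alt_eq_pick (c : List Int) (t : List (List Int)) :
    suggestPos_alt (c :: t) = (pick (keyOf c) c t).2 := by
  show (match (c :: t).foldl stepB none with
        | some b => b.2 | none => []) = (pick (keyOf c) c t).2
  simp [stepB, keyOf, foldB_some]

lemma pick_ge (t : List (List Int)) : ∀ (bk : Int) (bc : List Int),
    (∀ c ∈ t, bk ≤ keyOf c) → pick bk bc t = (bk, bc) := by
  induction t with
  | nil => intro bk bc _; rfl
  | cons c t ih =>
    intro bk bc h
    have hc : bk ≤ keyOf c := h c (by simp)
    simp only [pick, if_neg (by omega : ¬ keyOf c < bk)]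
    exact ih bk bc (fun c' hc' => h c' (by simp [hc']))

lemma pick_lt (t : List (List Int)) : ∀ (bk bk' : Int) (bc bc' : List Int),
    (∃ c ∈ t, keyOf c < bk) → bk ≤ bk' → pick bk bc t = pick bk' bc' t := by
  induction t with
  | nil => intro bk bk' bc bc' h _; obtain ⟨c, hc, _⟩ := h; simp at hc
  | cons c t ih =>
    intro bk bk' bc bc' h hle
    by_cases hck : keyOf c < bk
    · simp [pick, if_pos hck, if_pos (by omega : keyOf c < bk')]
    · have hex : ∃ c' ∈ t, keyOf c' < bk := by
        obtain ⟨c', hc', hlt⟩ := h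
        rcases List.mem_cons.mp hc' with rfl | hmem
        · omega
        · exact ⟨c', hmem, hlt⟩
      simp only [pick, if_neg hck]
      by_cases hck' : keyOf c < bk'
      · rw [if_pos hck']
        exact ih bk (keyOf c) bc c hex (by omega)
      · rw [if_neg hck']
        exact ih bk bk' bc bc' hex hle

lemma foldl_min_eq_self (t : List Int) : ∀ (a : Int), (∀ x ∈ t, a ≤ x) → t.foldl min a = a := by
  induction t with
  | nil => intro a _; rfl
  | cons x t ih =>
    intro a h
    have : min a x = a := min_eq_left (h x (by simp))
    simp only [List.foldl_cons, this]
    exact ih a (fun y hy => h y (by simp [hy]))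

-- A's result after the cellArr fold and min? are unfolded, for nonempty input
def aCore (c : List Int) (t : List (List Int)) : List Int :=
  let m := (t.map keyOf).foldl min (keyOf c)
  match PySem.List.index? (keyOf c :: t.map keyOf) m with
  | some j => (c :: t).getD j []
  | none => []

-- shape of A's final lookup when the head key is not the minimum
lemma matchIdx_cons (k m : Int) (ks : List Int) (c : List Int) (cs : List (List Int))
    (hne : k ≠ m) :
    (match PySem.List.index? (k :: ks) m with
     | some j => (c :: cs).getD j [] | none => []) =
    (match PySem.List.index? ks m with
     | some j => cs.getD j [] | none => []) := by
  rw [PySem.List.index?_cons_of_ne _ hne]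
  cases PySem.List.index? ks m <;> simp

-- shape of A's final lookup when the head key is the minimum
lemma matchIdx_self (k : Int) (ks : List Int) (c : List Int) (cs : List (List Int)) :
    (match PySem.List.index? (k :: ks) k with
     | some j => (c :: cs).getD j [] | none => []) = c := by
  rw [PySem.List.index?_cons_self]
  rfl

lemma aCore_eq_pick (t : List (List Int)) : ∀ (c : List Int),
    aCore c t = (pick (keyOf c) c t).2 := by
  induction t with
  | nil =>
    intro c
    show (match PySem.List.index? [keyOf c] (keyOf c) with
          | some j => [c].getD j [] | none => []) = (pick (keyOf c) c []).2
    rw [matchIdx_self]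
    rfl
  | cons c2 t ih =>
    intro c
    show (match PySem.List.index? (keyOf c :: keyOf c2 :: t.map keyOf)
            ((keyOf c2 :: t.map keyOf).foldl min (keyOf c)) with
          | some j => (c :: c2 :: t).getD j [] | none => []) = (pick (keyOf c) c (c2 :: t)).2
    by_cases h2 : keyOf c2 < keyOf c
    · -- strictly smaller key at c2: A skips the head, B replaces the best
      have hmin2 : min (keyOf c) (keyOf c2) = keyOf c2 := min_eq_right (by omega)
      have hm_le := (PySem.List.foldl_min_le (t.map keyOf) (keyOf c2)).1
      have hne : keyOf c ≠ (t.map keyOf).foldl min (keyOf c2) := by omega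
      rw [List.foldl_cons, hmin2, matchIdx_cons _ _ _ _ _ hne]
      have hL : (match PySem.List.index? (keyOf c2 :: t.map keyOf)
            ((t.map keyOf).foldl min (keyOf c2)) with
          | some j => (c2 :: t).getD j [] | none => []) = aCore c2 t := rfl
      rw [hL, ih c2]
      simp only [pick, if_pos h2]
    · -- keyOf c ≤ keyOf c2: the best key so far stays keyOf c
      have hmin2 : min (keyOf c) (keyOf c2) = keyOf c := min_eq_left (by omega)
      rw [List.foldl_cons, hmin2]
      by_cases hall : ∀ x ∈ t.map keyOf, keyOf c ≤ x
      · -- keyOf c is the global minimum: A picks index 0, B keeps (keyOf c, c)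
        rw [foldl_min_eq_self _ _ hall, matchIdx_self]
        simp only [pick, if_neg (by omega : ¬ keyOf c2 < keyOf c)]
        rw [pick_ge t (keyOf c) c (fun c' hc' => hall (keyOf c') (List.mem_map_of_mem hc'))]
      · -- some later key is strictly below keyOf c
        simp only [not_forall, not_le] at hall
        obtain ⟨x, hx, hxlt⟩ := hall
        have hm_lt : (t.map keyOf).foldl min (keyOf c) < keyOf c := by
          have := (PySem.List.foldl_min_le (t.map keyOf) (keyOf c)).2 x hx
          omega
        -- the running min ignores which of the two seeds is used
        have hm_eq : (t.map keyOf).foldl min (keyOf c)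
            = (t.map keyOf).foldl min (keyOf c2) := by
          rcases PySem.List.foldl_min_mem (t.map keyOf) (keyOf c) with he | hmem
          · omega
          · have h1 : (t.map keyOf).foldl min (keyOf c2)
                ≤ (t.map keyOf).foldl min (keyOf c) :=
              (PySem.List.foldl_min_le (t.map keyOf) (keyOf c2)).2 _ hmem
            have h2' : (t.map keyOf).foldl min (keyOf c)
                ≤ (t.map keyOf).foldl min (keyOf c2) := by
              rcases PySem.List.foldl_min_mem (t.map keyOf) (keyOf c2) with he2 | hmem2
              · rw [he2]; omega
              · exact (PySem.List.foldl_min_le (t.map keyOf) (keyOf c)).2 _ hmem2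
            omega
        have hne : keyOf c ≠ (t.map keyOf).foldl min (keyOf c) := by omega
        have hne2 : keyOf c2 ≠ (t.map keyOf).foldl min (keyOf c2) := by
          have := (PySem.List.foldl_min_le (t.map keyOf) (keyOf c2)).1
          omega
        rw [matchIdx_cons _ _ _ _ _ hne, hm_eq]
        have hR : (pick (keyOf c) c (c2 :: t)).2 = aCore c2 t := by
          have hB : pick (keyOf c) c t = pick (keyOf c2) c2 t := by
            apply pick_lt t (keyOf c) (keyOf c2) c c2
            · obtain ⟨c', hc', rfl⟩ := List.mem_map.mp hx
              exact ⟨c', hc', hxlt⟩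
            · omega
          simp only [pick, if_neg (by omega : ¬ keyOf c2 < keyOf c)]
          rw [hB, ← ih c2]
        rw [hR]
        have hA : aCore c2 t = (match PySem.List.index? (keyOf c2 :: t.map keyOf)
            ((t.map keyOf).foldl min (keyOf c2)) with
          | some j => (c2 :: t).getD j [] | none => []) := rfl
        rw [hA, matchIdx_cons _ _ _ _ _ hne2]

-- A's cellArr fold builds exactly the key list
lemma cellArr_eq (cells : List (List Int)) :
    (PySem.List.pyRange 0 (cells.length : Int) 1).foldl
      (fun acc i =>
        if PySem.List.pyGetD cells i [] ≠ [] then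
          acc ++ [PySem.List.pyGetD (PySem.List.pyGetD cells i []) 0 0]
        else acc ++ [3]) []
    = cells.map keyOf := by
  have h := PySem.List.foldl_pyRange_zero_pyGetD' cells ([] : List Int)
    (fun acc c => if c ≠ [] then acc ++ [PySem.List.pyGetD c 0 0] else acc ++ [3])
    ([] : List Int)
  rw [h]
  have hfun : (fun (acc : List Int) (c : List Int) =>
      if c ≠ [] then acc ++ [PySem.List.pyGetD c 0 0] else acc ++ [3])
      = fun acc c => acc ++ [keyOf c] := by
    funext acc c
    cases c with
    | nil => simp [keyOf]
    | cons v t => simp [keyOf, PySem.List.pyGetD_zero]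
  rw [hfun, PySem.List.foldl_append_singleton_eq_map]
  simp

lemma a_eq_aCore (c : List Int) (t : List (List Int)) :
    suggestPos (c :: t) = aCore c t := by
  simp only [suggestPos]
  rw [cellArr_eq (c :: t)]
  simp only [List.map_cons, PySem.List.min?_id_cons]
  have hA : aCore c t = (match PySem.List.index? (keyOf c :: t.map keyOf)
      ((t.map keyOf).foldl min (keyOf c)) with
    | some j => (c :: t).getD j [] | none => []) := rfl
  rw [hA]
  cases hidx : PySem.List.index? (keyOf c :: t.map keyOf)
      ((t.map keyOf).foldl min (keyOf c)) with
  | none => rfl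
  | some j => simp only [PySem.List.pyGetD_natCast]

-- ===== VERDICT (by name: the statement is the Claim_ definition above) =====
theorem suggestPos_spec : Claim_equal_suggestPos := by
  intro cells _ hpre
  unfold Spec_suggestPos
  cases cells with
  | nil => exact absurd rfl hpre
  | cons c t =>
    rw [a_eq_aCore, aCore_eq_pick, alt_eq_pick]
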